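-- pv_equiv track=rewrite | github.com/Kaastor/road-to-ai-coding | research/spetral-invariance/spectral_qnn/maximality/golomb_generators.py | _simple_golomb_construction
-- ===== SOURCE A (Python) =====
-- from typing import List, Tuple, Dict, Set, Optional
--
-- def _simple_golomb_construction(order: int) -> List[int]:
--     """Simple Golomb ruler construction (not optimal but valid)."""
--     if order <= 4:
--         # Known small Golomb rulers
--         rulers = {
--             1: [0],
--             2: [0, 1],
--             3: [0, 1, 3],
--             4: [0, 1, 4, 9]
--         }
--         return rulers[order]
--
--     # Simple construction: powers of 2 pattern
--     ruler = [0]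
--     pos = 1
--     for i in range(1, order):
--         ruler.append(pos)
--         pos += i + 1
--
--     return ruler
-- ===== SOURCE B (Python) =====
-- def _simple_golomb_construction(order):
--     """Simple Golomb ruler construction (not optimal but valid)."""
--     if order == 4:
--         return [0, 1, 4, 9]
--     # Triangular numbers give exactly A's values for orders 1-3 and >4.
--     return [k * (k + 1) // 2 for k in range(order)]
-- ===== Notes on version B (the rewrite author's own statement) =====
-- stated objective: simpler
-- what changed: The dict of small rulers and the running-sum accumulator loop are both replaced by one closed-form triangular-number comprehension k*(k+1)//2 (which already equals the dict entries for orders 1-3), leaving a single special case for order 4.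
import Mathlib
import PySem

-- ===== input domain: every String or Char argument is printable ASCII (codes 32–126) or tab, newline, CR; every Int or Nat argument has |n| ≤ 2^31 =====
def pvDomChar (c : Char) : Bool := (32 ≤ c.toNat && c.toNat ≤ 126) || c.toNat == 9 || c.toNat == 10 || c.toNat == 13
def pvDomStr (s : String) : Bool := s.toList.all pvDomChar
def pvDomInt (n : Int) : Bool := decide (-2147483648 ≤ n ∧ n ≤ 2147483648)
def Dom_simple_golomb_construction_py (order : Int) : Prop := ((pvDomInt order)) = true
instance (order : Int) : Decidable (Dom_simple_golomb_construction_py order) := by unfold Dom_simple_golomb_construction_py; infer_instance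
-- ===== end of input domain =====

-- B replaces A's small-ruler dict and running-sum accumulator loop by one closed-form
-- triangular-number comprehension (order 4 stays a special case). Objective: simpler.

-- ===== PORT A =====
def simple_golomb_construction_py (order : Int) : List Int :=
  if order ≤ 4 then
    -- rulers[order]; .getD [] is unreachable: Pre_ requires 1 ≤ order (KeyError otherwise)
    ((PySem.Dict.ofList [((1 : Int), ([0] : List Int)), (2, [0, 1]), (3, [0, 1, 3]),
        (4, [0, 1, 4, 9])]).get? order).getD []
  else
    -- ruler = [0]; pos = 1; for i in range(1, order): ruler.append(pos); pos += i + 1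
    ((PySem.List.pyRange 1 order 1).foldl
      (fun (st : List Int × Int) i => (st.1 ++ [st.2], st.2 + i + 1)) ([0], 1)).1

-- ===== PORT B =====
def simple_golomb_construction_py_alt (order : Int) : List Int :=
  if order = 4 then [0, 1, 4, 9]
  else
    -- [k * (k + 1) // 2 for k in range(order)]
    (PySem.List.pyRange 0 order 1).map (fun k => PySem.Int.floordiv (k * (k + 1)) 2)

-- ===== PRECONDITION & SPEC =====
-- Pre_ excludes order ≤ 0, on which A raises KeyError (dict lookup on a missing key).
def Pre_simple_golomb_construction_py (order : Int) : Prop := 1 ≤ order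
instance (order : Int) : Decidable (Pre_simple_golomb_construction_py order) := by
  unfold Pre_simple_golomb_construction_py; infer_instance
def pvWitness_simple_golomb_construction_py : Int := (7)

def Spec_simple_golomb_construction_py (order : Int) (out : List Int) : Prop :=
  out = simple_golomb_construction_py_alt order
instance (order : Int) (out : List Int) : Decidable (Spec_simple_golomb_construction_py order out) := by
  unfold Spec_simple_golomb_construction_py; infer_instance

-- ===== CLAIM =====
def Claim_equal_simple_golomb_construction_py : Prop := ∀ (order : Int), Dom_simple_golomb_construction_py order → Pre_simple_golomb_construction_py order → Spec_simple_golomb_construction_py order (simple_golomb_construction_py order)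

-- ===== LEMMAS AND PROOFS =====

-- A's loop state after consuming range(1, n): positions are the triangular numbers.
theorem golomb_loop_inv (n : Nat) :
    (PySem.List.pyRange 1 ((n : Int) + 1) 1).foldl
      (fun (st : List Int × Int) i => (st.1 ++ [st.2], st.2 + i + 1)) ([0], 1)
    = ((PySem.List.pyRange 0 ((n : Int) + 1) 1).map
          (fun k => PySem.Int.floordiv (k * (k + 1)) 2),
       PySem.Int.floordiv (((n : Int) + 1) * ((n : Int) + 2)) 2) := by
  induction n with
  | zero =>
      decide
  | succ m ih =>
      have h1 : (1 : Int) ≤ (m : Int) + 1 := by omega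
      have h0 : (0 : Int) ≤ (m : Int) + 1 := by omega
      have hs : ((m + 1 : Nat) : Int) + 1 = ((m : Int) + 1) + 1 := by push_cast; ring
      rw [hs, PySem.List.pyRange_one_succ_right h1, PySem.List.pyRange_one_succ_right h0,
        List.foldl_append, ih, List.map_append]
      simp only [List.foldl_cons, List.foldl_nil, List.map_cons, List.map_nil,
        Prod.mk.injEq]
      push_cast
      simp only [PySem.Int.floordiv_eq_ediv_of_pos (show (0 : Int) < 2 by norm_num)]
      constructor
      · congr 3
      · have hp : ((m : Int) + 1 + 1) * ((m : Int) + 1 + 2)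
            = ((m : Int) + 1) * ((m : Int) + 2) + 2 * ((m : Int) + 2) := by ring
        rw [hp]
        omega

-- ===== VERDICT =====
theorem simple_golomb_construction_py_spec : Claim_equal_simple_golomb_construction_py := by
  intro order _ hpre
  unfold Spec_simple_golomb_construction_py simple_golomb_construction_py simple_golomb_construction_py_alt
  by_cases h : order ≤ 4
  · have h4 : order = 1 ∨ order = 2 ∨ order = 3 ∨ order = 4 := by
      unfold Pre_simple_golomb_construction_py at hpre; omega
    rcases h4 with rfl | rfl | rfl | rfl <;> decide
  · simp only [if_neg h, if_neg (show ¬ order = 4 by omega)]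
    obtain ⟨n, hn⟩ : ∃ n : Nat, order = (n : Int) + 1 := by
      refine ⟨(order - 1).toNat, ?_⟩
      have : (0 : Int) ≤ order - 1 := by
        unfold Pre_simple_golomb_construction_py at hpre; omega
      omega
    subst hn
    rw [golomb_loop_inv]
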